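-- pv_equiv track=rewrite | github.com/anime-artist/psycho-me | for_examination.py | exclaim
-- ===== SOURCE A (Python) =====
-- def identical(let1, let2):
--     if let1 == let2:
--         return True
--     return False
--
-- def ax_others(num_list, let1):
--     new_num_list = []
--     for letter, num in num_list:
--         if let1 == letter and num - 1 >= 0:
--             new_num_list.append((letter, num - 1))
--         else:
--             new_num_list.append((letter, num))
--     return new_num_list
--
-- def exclaim(guess, secret_word, output, num_list):
--     indexes = []
--     for i in range(5):
--         let1 = guess[i]
--         let2 = secret_word[i]
--         if identical(let1, let2):
--             output[i] = "!"
--             num_list = ax_others(num_list, let1)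
--             indexes.append((let1, int(i)))
--     return output, num_list, indexes
-- ===== SOURCE B (Python) =====
-- def exclaim(guess, secret_word, output, num_list):
--     indexes = []
--     counts = {}
--     for i in range(5):
--         if guess[i] == secret_word[i]:
--             let = guess[i]
--             output[i] = "!"
--             indexes.append((let, i))
--             counts[let] = counts.get(let, 0) + 1
--     new_num_list = [(letter, num - min(counts.get(letter, 0), max(num, 0)))
--                     for letter, num in num_list]
--     return output, new_num_list, indexes
-- ===== Notes on version B (the rewrite author's own statement) =====
-- stated objective: alternative
-- what changed: A rebuilds the whole num_list once per matched position (ax_others per match); B makes one pass over the five positions accumulating a letter counter, then rebuilds num_list once, computing each new count in closed form as num - min(counts[letter], max(num, 0)).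
import Mathlib
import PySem

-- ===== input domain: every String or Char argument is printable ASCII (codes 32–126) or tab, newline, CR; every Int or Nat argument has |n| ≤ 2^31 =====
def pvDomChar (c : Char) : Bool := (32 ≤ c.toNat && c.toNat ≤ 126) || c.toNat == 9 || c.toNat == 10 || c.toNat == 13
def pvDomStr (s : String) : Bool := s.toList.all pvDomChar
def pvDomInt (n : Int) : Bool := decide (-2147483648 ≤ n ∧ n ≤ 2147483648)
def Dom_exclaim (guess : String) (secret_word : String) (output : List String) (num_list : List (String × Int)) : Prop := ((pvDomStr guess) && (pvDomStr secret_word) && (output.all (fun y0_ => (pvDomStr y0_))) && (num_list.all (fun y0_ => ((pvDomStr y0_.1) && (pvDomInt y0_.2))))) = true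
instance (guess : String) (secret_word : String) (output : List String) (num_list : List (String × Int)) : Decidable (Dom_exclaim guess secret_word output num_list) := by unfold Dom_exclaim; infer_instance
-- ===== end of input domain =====

-- B replaces A's per-match full rebuild of num_list (ax_others once per matched letter) by one counter
-- pass plus a single rebuild; return-value equivalence only (both mutate/replace `output` the same way).


-- ===== PORT A =====
def identical (let1 : String) (let2 : String) : Bool :=
  if let1 = let2 then true else false

def ax_others (num_list : List (String × Int)) (let1 : String) : List (String × Int) :=
  num_list.foldl (fun new_num_list p =>
    if let1 = p.1 ∧ p.2 - 1 ≥ 0 then new_num_list ++ [(p.1, p.2 - 1)]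
    else new_num_list ++ [p]) []

def exclaim (guess : String) (secret_word : String) (output : List String) (num_list : List (String × Int)) : List String × (List (String × Int)) × (List (String × Int)) :=
  (PySem.List.pyRange 0 5 1).foldl (fun st i =>
    match PySem.List.pyGet? guess.toList i, PySem.List.pyGet? secret_word.toList i with
    | some c1, some c2 =>
      let let1 := String.ofList [c1]
      let let2 := String.ofList [c2]
      if identical let1 let2 then
        (PySem.List.pySetD st.1 i "!", ax_others st.2.1 let1, st.2.2 ++ [(let1, i)])
      else st
    | _, _ => st)  -- none = IndexError in Python; excluded by Pre_
    (output, num_list, ([] : List (String × Int)))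

-- ===== PORT B =====
def exclaim_alt (guess : String) (secret_word : String) (output : List String) (num_list : List (String × Int)) : List String × (List (String × Int)) × (List (String × Int)) :=
  let st := (PySem.List.pyRange 0 5 1).foldl (fun st i =>
    match PySem.List.pyGet? guess.toList i with
    | none => st  -- IndexError in Python; excluded by Pre_
    | some c1 =>
      match PySem.List.pyGet? secret_word.toList i with
      | none => st  -- IndexError in Python; excluded by Pre_
      | some c2 =>
        if String.ofList [c1] = String.ofList [c2] then
          let l := String.ofList [c1]
          (PySem.List.pySetD st.1 i "!", st.2.1.insert l (st.2.1.getD l 0 + 1), st.2.2 ++ [(l, i)])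
        else st)
    (output, (PySem.Dict.empty : PySem.Dict String Int), ([] : List (String × Int)))
  (st.1, num_list.map (fun p => (p.1, p.2 - min (st.2.1.getD p.1 0) (max p.2 0))), st.2.2)

-- ===== PRECONDITION & SPEC =====
-- Pre_ excludes exactly the inputs where Python A raises IndexError: guess or secret_word shorter
-- than 5, or a matched position i with i ≥ len(output).
def Pre_exclaim (guess : String) (secret_word : String) (output : List String) (num_list : List (String × Int)) : Prop :=
  5 ≤ guess.toList.length ∧ 5 ≤ secret_word.toList.length ∧
  ∀ i ∈ List.range 5, guess.toList[i]? = secret_word.toList[i]? → i < output.length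
instance (guess : String) (secret_word : String) (output : List String) (num_list : List (String × Int)) : Decidable (Pre_exclaim guess secret_word output num_list) := by unfold Pre_exclaim; infer_instance

def pvWitness_exclaim : String × String × List String × (List (String × Int)) :=
  ("abcae", "abxyz", ["q", "q", "q"], [("a", 2), ("b", 0), ("z", -1)])

def Spec_exclaim (guess : String) (secret_word : String) (output : List String) (num_list : List (String × Int)) (out : List String × (List (String × Int)) × (List (String × Int))) : Prop := out = exclaim_alt guess secret_word output num_list
instance (guess : String) (secret_word : String) (output : List String) (num_list : List (String × Int)) (out : List String × (List (String × Int)) × (List (String × Int))) : Decidable (Spec_exclaim guess secret_word output num_list out) := by unfold Spec_exclaim; infer_instance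

-- ===== CLAIM (what is proved, stated in full; the proofs are below) =====
def Claim_equal_exclaim : Prop := ∀ (guess : String) (secret_word : String) (output : List String) (num_list : List (String × Int)), Dom_exclaim guess secret_word output num_list → Pre_exclaim guess secret_word output num_list → Spec_exclaim guess secret_word output num_list (exclaim guess secret_word output num_list)

-- ===== LEMMAS AND PROOFS =====

-- the list of matched (letter, index) pairs produced while scanning the index list `is`
def matchedL (g s : List Char) (is : List Int) : List (Char × Int) :=
  is.filterMap (fun i =>
    match PySem.List.pyGet? g i, PySem.List.pyGet? s i with
    | some c1, some c2 => if c1 = c2 then some (c1, i) else none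
    | _, _ => none)

lemma ofList_inj {l l' : List Char} : String.ofList l = String.ofList l' ↔ l = l' :=
  ⟨fun h => by simpa using congrArg String.toList h, fun h => by rw [h]⟩

lemma ax_others_eq_map (nl : List (String × Int)) (l : String) :
    ax_others nl l = nl.map (fun p => if l = p.1 ∧ 1 ≤ p.2 then (p.1, p.2 - 1) else p) := by
  have h : ∀ (nl : List (String × Int)) (acc : List (String × Int)),
      nl.foldl (fun a p => if l = p.1 ∧ p.2 - 1 ≥ 0 then a ++ [(p.1, p.2 - 1)] else a ++ [p]) acc
        = acc ++ nl.map (fun p => if l = p.1 ∧ 1 ≤ p.2 then (p.1, p.2 - 1) else p) := by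
    intro nl
    induction nl with
    | nil => simp
    | cons q t ih =>
      intro acc
      simp only [List.foldl_cons, List.map_cons, ih]
      by_cases h1 : l = q.1 ∧ 1 ≤ q.2
      · have h2 : l = q.1 ∧ q.2 - 1 ≥ 0 := ⟨h1.1, by omega⟩
        simp [h2, h1]
      · have h2 : ¬ (l = q.1 ∧ q.2 - 1 ≥ 0) := by
          intro hc; exact h1 ⟨hc.1, by omega⟩
        simp [h2, h1]
  simpa [ax_others] using h nl []

lemma foldl_ax_others (ms : List (Char × Int)) (nl : List (String × Int)) :
    ms.foldl (fun nl p => ax_others nl (String.ofList [p.1])) nl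
      = nl.map (fun q => (q.1, q.2 - min ((ms.countP (fun p => String.ofList [p.1] == q.1)) : Int) (max q.2 0))) := by
  induction ms generalizing nl with
  | nil =>
    simp only [List.foldl_nil, List.countP_nil, Nat.cast_zero]
    have : ∀ q : String × Int, (q.1, q.2 - min (0 : Int) (max q.2 0)) = q := by
      intro q; have : min (0 : Int) (max q.2 0) = 0 := by omega
      simp [this]
    simp [this]
  | cons m ms ih =>
    rw [List.foldl_cons, ih, ax_others_eq_map, List.map_map]
    simp only [List.countP_cons]
    apply List.map_congr_left
    intro q _
    simp only [Function.comp_apply]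
    by_cases hm : String.ofList [m.1] = q.1
    · have hb : (String.ofList [m.1] == q.1) = true := by simp [hm]
      by_cases h2 : 1 ≤ q.2
      · simp only [hm, h2, and_self, if_true, beq_self_eq_true, Prod.mk.injEq, true_and, ite_true]
        push_cast
        omega
      · simp only [hm, h2, and_false, if_false, beq_self_eq_true, if_true, Prod.mk.injEq, true_and, ite_true]
        push_cast
        omega
    · have hb : (String.ofList [m.1] == q.1) = false := by simp [hm]
      have hn : ¬ (String.ofList [m.1] = q.1 ∧ 1 ≤ q.2) := fun hc => hm hc.1
      simp [hn, hb]
  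
lemma foldA_eq (g s : List Char) (is : List Int) (o : List String)
    (nl ix : List (String × Int)) :
    is.foldl (fun st i =>
      match PySem.List.pyGet? g i, PySem.List.pyGet? s i with
      | some c1, some c2 =>
        let let1 := String.ofList [c1]
        let let2 := String.ofList [c2]
        if identical let1 let2 then
          (PySem.List.pySetD st.1 i "!", ax_others st.2.1 let1, st.2.2 ++ [(let1, i)])
        else st
      | _, _ => st) (o, nl, ix)
    = ((matchedL g s is).foldl (fun o p => PySem.List.pySetD o p.2 "!") o,
       (matchedL g s is).foldl (fun nl p => ax_others nl (String.ofList [p.1])) nl,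
       ix ++ (matchedL g s is).map (fun p => (String.ofList [p.1], p.2))) := by
  induction is generalizing o nl ix with
  | nil => simp [matchedL]
  | cons i is ih =>
    simp only [List.foldl_cons, matchedL, List.filterMap_cons]
    cases h1 : PySem.List.pyGet? g i with
    | none =>
      cases h2 : PySem.List.pyGet? s i <;> simpa [matchedL, h1, h2] using ih o nl ix
    | some c1 =>
      cases h2 : PySem.List.pyGet? s i with
      | none => simpa [matchedL, h1, h2] using ih o nl ix
      | some c2 =>
        by_cases hc : c1 = c2
        · subst hc
          have hid : identical (String.ofList [c1]) (String.ofList [c1]) = true := by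
            simp [identical]
          simpa [matchedL, h1, h2, hid] using
            ih (PySem.List.pySetD o i "!") (ax_others nl (String.ofList [c1])) (ix ++ [(String.ofList [c1], i)])
        · have hne : ¬ String.ofList [c1] = String.ofList [c2] := by simp [ofList_inj, hc]
          have hid : identical (String.ofList [c1]) (String.ofList [c2]) = false := by
            simp [identical, hne]
          simpa [matchedL, h1, h2, hc, hid] using ih o nl ix

lemma foldB_eq (g s : List Char) (is : List Int) (o : List String)
    (cnt : PySem.Dict String Int) (ix : List (String × Int)) :
    is.foldl (fun st i =>
      match PySem.List.pyGet? g i with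
      | none => st
      | some c1 =>
        match PySem.List.pyGet? s i with
        | none => st
        | some c2 =>
          if String.ofList [c1] = String.ofList [c2] then
            let l := String.ofList [c1]
            (PySem.List.pySetD st.1 i "!", st.2.1.insert l (st.2.1.getD l 0 + 1), st.2.2 ++ [(l, i)])
          else st) (o, cnt, ix)
    = ((matchedL g s is).foldl (fun o p => PySem.List.pySetD o p.2 "!") o,
       (matchedL g s is).foldl (fun d p => d.insert (String.ofList [p.1]) (d.getD (String.ofList [p.1]) 0 + 1)) cnt,
       ix ++ (matchedL g s is).map (fun p => (String.ofList [p.1], p.2))) := by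
  induction is generalizing o cnt ix with
  | nil => simp [matchedL]
  | cons i is ih =>
    simp only [List.foldl_cons, matchedL, List.filterMap_cons]
    cases h1 : PySem.List.pyGet? g i with
    | none =>
      cases h2 : PySem.List.pyGet? s i <;> simpa [matchedL, h1, h2] using ih o cnt ix
    | some c1 =>
      cases h2 : PySem.List.pyGet? s i with
      | none => simpa [matchedL, h1, h2] using ih o cnt ix
      | some c2 =>
        by_cases hc : c1 = c2
        · subst hc
          simpa [matchedL, h1, h2] using
            ih (PySem.List.pySetD o i "!") (cnt.insert (String.ofList [c1]) (cnt.getD (String.ofList [c1]) 0 + 1)) (ix ++ [(String.ofList [c1], i)])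
        · have hne : ¬ String.ofList [c1] = String.ofList [c2] := by simp [ofList_inj, hc]
          simpa [matchedL, h1, h2, hc, hne] using ih o cnt ix

lemma counts_getD (ms : List (Char × Int)) (q : String) :
    (ms.foldl (fun d p => d.insert (String.ofList [p.1]) (d.getD (String.ofList [p.1]) 0 + 1))
        (PySem.Dict.empty : PySem.Dict String Int)).getD q 0
      = (ms.countP (fun p => String.ofList [p.1] == q) : Int) := by
  have h1 : ms.foldl (fun d p => d.insert (String.ofList [p.1]) (d.getD (String.ofList [p.1]) 0 + 1))
        (PySem.Dict.empty : PySem.Dict String Int)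
      = (ms.map (fun p => String.ofList [p.1])).foldl (fun d x => d.insert x (d.getD x 0 + 1))
        (PySem.Dict.empty : PySem.Dict String Int) := by
    rw [List.foldl_map]
  rw [h1, PySem.Dict.getD_foldl_insert_add_one]
  simp [List.count_eq_countP, List.countP_map, Function.comp_def]

-- ===== VERDICT (by name: the statement is the Claim_ definition above) =====
theorem exclaim_spec : Claim_equal_exclaim := by
  intro guess secret_word output num_list _ _
  unfold Spec_exclaim exclaim exclaim_alt
  rw [foldA_eq, foldB_eq]
  simp only [Prod.mk.injEq, foldl_ax_others, counts_getD, true_and, and_true]
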